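-- pv_equiv track=rewrite | github.com/markbravo0312/advent2024 | day_7/day_7.py | rec_op_part1
-- ===== SOURCE A (Python) =====
-- def rec_op_part1(result, op, running, j, nums):
--     if j == len(nums):
--         return running == result
--
--     match op:
--         case '*':
--             temp = running * nums[j]
--         case '+':
--             temp = running + nums[j]
--
--     if temp > result:
--         return False
--     else:
--         return (rec_op_part1(result, '*', temp, j + 1, nums) or
--                 rec_op_part1(result, '+', temp, j + 1, nums))
-- ===== SOURCE B (Python) =====
-- def rec_op_part1(result, op, running, j, nums):
--     stack = [(op, running, j)]
--     while stack:
--         o, run, k = stack.pop()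
--         if k == len(nums):
--             if run == result:
--                 return True
--             continue
--         temp = run * nums[k] if o == '*' else run + nums[k]
--         if temp > result:
--             continue
--         stack.append(('+', temp, k + 1))
--         stack.append(('*', temp, k + 1))
--     return False
-- ===== Notes on version B (the rewrite author's own statement) =====
-- stated objective: alternative
-- what changed: Replaces the binary recursion (try '*' then '+' via short-circuit or) by an iterative DFS over an explicit stack of (op, running, index) frames with the same pruning; same exponential worst case, no recursion depth limit.
import Mathlib
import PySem

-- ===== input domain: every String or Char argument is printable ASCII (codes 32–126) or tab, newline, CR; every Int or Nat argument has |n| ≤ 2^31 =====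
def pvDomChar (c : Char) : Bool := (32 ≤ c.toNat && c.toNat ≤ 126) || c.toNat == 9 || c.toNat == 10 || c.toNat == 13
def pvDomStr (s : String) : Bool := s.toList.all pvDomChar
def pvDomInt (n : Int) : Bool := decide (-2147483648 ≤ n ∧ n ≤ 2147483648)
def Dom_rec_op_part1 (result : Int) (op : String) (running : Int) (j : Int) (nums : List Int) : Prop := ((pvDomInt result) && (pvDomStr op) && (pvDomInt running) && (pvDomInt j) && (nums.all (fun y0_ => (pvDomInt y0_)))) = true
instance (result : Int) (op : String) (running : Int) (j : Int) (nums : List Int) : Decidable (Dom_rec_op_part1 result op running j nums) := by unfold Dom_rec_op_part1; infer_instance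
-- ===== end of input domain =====

-- B replaces A's binary recursion by an explicit-stack DFS loop (different decomposition,
-- same pruning and same values); equivalence of the return values is proved on Pre_ below.

-- ===== PORT A =====
-- A recurses with j+1 until j == len(nums); the Lean port carries a fuel argument
-- (2*len+2 bounds the recursion depth on every input Pre_ admits; fuel 0 is unreachable there).
-- 'match op' that binds no temp (op not '*'/'+') raises UnboundLocalError in Python:
-- modelled by temp? = none, result 'false', and excluded by Pre_.
def recGoA : Nat → Int → String → Int → Int → List Int → Bool
  | 0, _, _, _, _, _ => false
  | f+1, result, op, running, j, nums =>
    if j = (nums.length : Int) then decide (running = result)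
    else
      match PySem.List.pyGet? nums j with  -- nums[j]; none = IndexError, excluded by Pre_
      | none => false
      | some v =>
        match (if op = "*" then some (running * v)
               else if op = "+" then some (running + v) else none) with
        | none => false
        | some temp =>
          if temp > result then false
          else recGoA f result "*" temp (j+1) nums || recGoA f result "+" temp (j+1) nums

def rec_op_part1 (result : Int) (op : String) (running : Int) (j : Int) (nums : List Int) : Bool :=
  recGoA (2 * nums.length + 2) result op running j nums

-- ===== PORT B =====
-- Source B's while-loop over an explicit stack; the list head is the stack top (Python's pop()
-- from the end); fuel 2^(2*len+2) bounds the number of pops on every input Pre_ admits.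
def altLoop : Nat → Int → List Int → List (String × Int × Int) → Bool
  | _, _, _, [] => false
  | 0, _, _, _ :: _ => false
  | f+1, result, nums, (o, run, k) :: rest =>
    if k = (nums.length : Int) then
      if run = result then true else altLoop f result nums rest
    else
      match PySem.List.pyGet? nums k with  -- nums[k]; none = IndexError, excluded by Pre_
      | none => false
      | some v =>
        let temp := if o = "*" then run * v else run + v
        if temp > result then altLoop f result nums rest
        else altLoop f result nums (("*", temp, k+1) :: ("+", temp, k+1) :: rest)

def rec_op_part1_alt (result : Int) (op : String) (running : Int) (j : Int) (nums : List Int) : Bool :=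
  altLoop (2 ^ (2 * nums.length + 2)) result nums [(op, running, j)]

-- ===== PRECONDITION & SPEC =====
-- Pre_ = exactly the inputs on which Python A returns: the base case j == len(nums), or a
-- valid (possibly negative, Python-wraparound) index j with op one of '*'/'+'.  Outside it
-- A raises (IndexError on nums[j], or UnboundLocalError on an unknown op).
def Pre_rec_op_part1 (result : Int) (op : String) (running : Int) (j : Int) (nums : List Int) : Prop :=
  j = (nums.length : Int) ∨
    (-(nums.length : Int) ≤ j ∧ j < (nums.length : Int) ∧ (op = "*" ∨ op = "+"))
instance (result : Int) (op : String) (running : Int) (j : Int) (nums : List Int) : Decidable (Pre_rec_op_part1 result op running j nums) := by unfold Pre_rec_op_part1; infer_instance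

def pvWitness_rec_op_part1 : Int × String × Int × Int × List Int := (10, "+", 0, 0, [3, 7])

def Spec_rec_op_part1 (result : Int) (op : String) (running : Int) (j : Int) (nums : List Int) (out : Bool) : Prop := out = rec_op_part1_alt result op running j nums
instance (result : Int) (op : String) (running : Int) (j : Int) (nums : List Int) (out : Bool) : Decidable (Spec_rec_op_part1 result op running j nums out) := by unfold Spec_rec_op_part1; infer_instance

-- ===== CLAIM (what is proved, stated in full; the proofs are below) =====
def Claim_equal_rec_op_part1 : Prop := ∀ (result : Int) (op : String) (running : Int) (j : Int) (nums : List Int), Dom_rec_op_part1 result op running j nums → Pre_rec_op_part1 result op running j nums → Spec_rec_op_part1 result op running j nums (rec_op_part1 result op running j nums)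

-- ===== LEMMAS AND PROOFS =====

-- the A-side recursion evaluated with any sufficient fuel
def frameR (result : Int) (nums : List Int) : String × Int × Int → Bool :=
  fun fr => recGoA (2 * nums.length + 2) result fr.1 fr.2.1 fr.2.2 nums

-- invariant every stack frame satisfies
def frameOK (nums : List Int) : String × Int × Int → Prop :=
  fun fr => fr.2.2 = (nums.length : Int) ∨
    (-(nums.length : Int) ≤ fr.2.2 ∧ fr.2.2 < (nums.length : Int) ∧ (fr.1 = "*" ∨ fr.1 = "+"))

-- fuel a frame can consume: the size of its recursion tree
def frameCost (nums : List Int) : String × Int × Int → Nat :=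
  fun fr => 2 ^ (((nums.length : Int) - fr.2.2).toNat + 1) - 1

theorem recGoA_fuel (result : Int) (nums : List Int) :
    ∀ (d f g : Nat) (op : String) (running j : Int),
      ((nums.length : Int) - j).toNat = d → d < f → d < g →
      recGoA f result op running j nums = recGoA g result op running j nums := by
  intro d
  induction d with
  | zero =>
    intro f g op running j hm hf hg
    obtain ⟨f', rfl⟩ : ∃ f', f = f' + 1 := ⟨f - 1, by omega⟩
    obtain ⟨g', rfl⟩ : ∃ g', g = g' + 1 := ⟨g - 1, by omega⟩
    by_cases hj : j = (nums.length : Int)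
    · simp [recGoA, hj]
    · have hnone : PySem.List.pyGet? nums j = none := by
        rw [PySem.List.pyGet?_eq_none_iff]
        intro hin
        have := hin.2
        omega
      simp [recGoA, hj, hnone]
  | succ d ih =>
    intro f g op running j hm hf hg
    obtain ⟨f', rfl⟩ : ∃ f', f = f' + 1 := ⟨f - 1, by omega⟩
    obtain ⟨g', rfl⟩ : ∃ g', g = g' + 1 := ⟨g - 1, by omega⟩
    by_cases hj : j = (nums.length : Int)
    · simp [recGoA, hj]
    · cases hv : PySem.List.pyGet? nums j with
      | none => simp [recGoA, hj, hv]
      | some v =>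
        have hj' : ((nums.length : Int) - (j + 1)).toNat = d := by omega
        by_cases h1 : op = "*"
        · subst h1
          simp only [recGoA, if_neg hj, hv]
          simp only [reduceIte]
          simp only [ih f' g' "*" (running * v) (j+1) hj' (by omega) (by omega),
              ih f' g' "+" (running * v) (j+1) hj' (by omega) (by omega)]
        · by_cases h2 : op = "+"
          · subst h2
            simp only [recGoA, if_neg hj, hv]
            simp only [if_neg h1, if_true, ih f' g' "*" (running + v) (j+1) hj' (by omega) (by omega),
                ih f' g' "+" (running + v) (j+1) hj' (by omega) (by omega)]
          · simp [recGoA, hj, hv, h1, h2]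

theorem one_le_frameCost (nums : List Int) (fr : String × Int × Int) :
    1 ≤ frameCost nums fr := by
  unfold frameCost
  have : 2 ≤ 2 ^ (((nums.length : Int) - fr.2.2).toNat + 1) := by
    calc 2 = 2 ^ 1 := rfl
    _ ≤ _ := Nat.pow_le_pow_right (by omega) (by omega)
  omega

theorem altLoop_eq_any (result : Int) (nums : List Int) :
    ∀ (f : Nat) (stack : List (String × Int × Int)),
      (∀ fr ∈ stack, frameOK nums fr) →
      (stack.map (frameCost nums)).sum ≤ f →
      altLoop f result nums stack = stack.any (frameR result nums) := by
  intro f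
  induction f with
  | zero =>
    intro stack hok hc
    cases stack with
    | nil => simp [altLoop]
    | cons fr rest =>
      exfalso
      have := one_le_frameCost nums fr
      simp at hc
      omega
  | succ f ih =>
    intro stack hok hc
    cases stack with
    | nil => simp [altLoop]
    | cons fr rest =>
      obtain ⟨o, run, k⟩ := fr
      have hok1 := hok _ (List.mem_cons_self ..)
      have hokr : ∀ fr ∈ rest, frameOK nums fr := fun fr h => hok _ (List.mem_cons_of_mem _ h)
      have h1 := one_le_frameCost nums (o, run, k)
      have hcr : (rest.map (frameCost nums)).sum ≤ f := by
        simp at hc ⊢; omega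
      by_cases hk : k = (nums.length : Int)
      · by_cases hr : run = result
        · simp [altLoop, hk, hr, frameR, recGoA]
        · rw [show altLoop (f+1) result nums ((o, run, k) :: rest)
                = altLoop f result nums rest by simp [altLoop, hk, hr]]
          rw [ih rest hokr hcr]
          simp [frameR, recGoA, hk, hr]
      · have hrange : -(nums.length : Int) ≤ k ∧ k < (nums.length : Int) ∧ (o = "*" ∨ o = "+") := by
          rcases hok1 with h | h
          · exact absurd h hk
          · exact h
        obtain ⟨hlo, hhi, hop⟩ := hrange
        obtain ⟨v, hv⟩ : ∃ v, PySem.List.pyGet? nums k = some v := by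
          cases hv : PySem.List.pyGet? nums k with
          | none =>
            rw [PySem.List.pyGet?_eq_none_iff] at hv
            exact absurd (by constructor <;> omega) hv
          | some v => exact ⟨v, rfl⟩
        -- temp is the same value on both sides since o ∈ {"*", "+"}
        have htemp : (if o = "*" then some (run * v) else if o = "+" then some (run + v) else none)
            = some (if o = "*" then run * v else run + v) := by
          rcases hop with h | h <;> simp [h]
        set temp := (if o = "*" then run * v else run + v) with htdef
        have hA : frameR result nums (o, run, k)
            = (if temp > result then false
               else recGoA (2 * nums.length + 1) result "*" temp (k+1) nums
                    || recGoA (2 * nums.length + 1) result "+" temp (k+1) nums) := by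
          simp only [frameR, recGoA, hv, if_neg hk, htemp]
        by_cases ht : temp > result
        · rw [show altLoop (f+1) result nums ((o, run, k) :: rest)
                = altLoop f result nums rest by simp [altLoop, hk, hv, ← htdef, ht]]
          rw [ih rest hokr hcr]
          simp [hA, ht]
        · have hnew : ∀ fr ∈ (("*", temp, k+1) :: ("+", temp, k+1) :: rest), frameOK nums fr := by
            intro fr hfr
            simp at hfr
            rcases hfr with rfl | rfl | hfr
            · simp only [frameOK]
              by_cases h : k + 1 = (nums.length : Int)
              · exact Or.inl h
              · exact Or.inr ⟨by omega, by omega, by simp⟩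
            · simp only [frameOK]
              by_cases h : k + 1 = (nums.length : Int)
              · exact Or.inl h
              · exact Or.inr ⟨by omega, by omega, by simp⟩
            · exact hokr _ hfr
          have hcost : ((("*", temp, k+1) :: ("+", temp, k+1) :: rest).map (frameCost nums)).sum ≤ f := by
            have hm : ((nums.length : Int) - k).toNat = ((nums.length : Int) - (k+1)).toNat + 1 := by omega
            have hck : frameCost nums (o, run, k)
                = 2 ^ (((nums.length : Int) - (k+1)).toNat + 1 + 1) - 1 := by
              simp [frameCost, hm]
            have hck1 : frameCost nums ("*", temp, k+1)
                = 2 ^ (((nums.length : Int) - (k+1)).toNat + 1) - 1 := by simp [frameCost]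
            have hck2 : frameCost nums ("+", temp, k+1)
                = 2 ^ (((nums.length : Int) - (k+1)).toNat + 1) - 1 := by simp [frameCost]
            have hpow : 2 ^ (((nums.length : Int) - (k+1)).toNat + 1 + 1)
                = 2 * 2 ^ (((nums.length : Int) - (k+1)).toNat + 1) := by ring
            have hge : 1 ≤ 2 ^ (((nums.length : Int) - (k+1)).toNat + 1) := Nat.one_le_two_pow
            simp only [List.map_cons, List.sum_cons, hck1, hck2]
            simp only [List.map_cons, List.sum_cons, hck, hpow] at hc
            omega
          rw [show altLoop (f+1) result nums ((o, run, k) :: rest)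
                = altLoop f result nums (("*", temp, k+1) :: ("+", temp, k+1) :: rest) by
              simp [altLoop, hk, hv, ← htdef, ht]]
          rw [ih _ hnew hcost]
          simp only [List.any_cons]
          have hm1 : ((nums.length : Int) - (k+1)).toNat < 2 * nums.length + 1 := by omega
          have hbump : ∀ o', recGoA (2 * nums.length + 1) result o' temp (k+1) nums
              = recGoA (2 * nums.length + 2) result o' temp (k+1) nums := fun o' =>
            recGoA_fuel result nums _ _ _ o' temp (k+1) rfl hm1 (by omega)
          rw [hA, if_neg ht, hbump "*", hbump "+"]
          simp [frameR, Bool.or_assoc]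

theorem rec_op_part1_spec : Claim_equal_rec_op_part1 := by
  intro result op running j nums _ hpre
  unfold Spec_rec_op_part1 rec_op_part1 rec_op_part1_alt
  have hok : ∀ fr ∈ [(op, running, j)], frameOK nums fr := by
    intro fr hfr
    simp at hfr
    subst hfr
    exact hpre
  have hm : ((nums.length : Int) - j).toNat + 1 ≤ 2 * nums.length + 2 := by
    rcases hpre with h | h <;> omega
  have hc : ([(op, running, j)].map (frameCost nums)).sum ≤ 2 ^ (2 * nums.length + 2) := by
    have : 2 ^ (((nums.length : Int) - j).toNat + 1) ≤ 2 ^ (2 * nums.length + 2) :=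
      Nat.pow_le_pow_right (by omega) hm
    simp [frameCost]
    omega
  rw [altLoop_eq_any result nums _ _ hok hc]
  simp [frameR]
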